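-- pv_equiv track=rewrite | github.com/mdequeljoe/aoc2022 | day17.py | shift_x
-- ===== SOURCE A (Python) =====
-- def shift_x(x, n=2, lim_x=6):
--     coords = []
--     for el in x:
--         if n > 0 and el[0] + n >= lim_x:
--             return x
--         if n < 0 and el[0] + n <= lim_x:
--             return x
--         coords.append((el[0] + n, el[1]))
--     return coords
-- ===== SOURCE B (Python) =====
-- def shift_x(x, n=2, lim_x=6):
--     if n > 0:
--         blocked = any(el[0] + n >= lim_x for el in x)
--     elif n < 0:
--         blocked = any(el[0] + n <= lim_x for el in x)
--     else:
--         blocked = False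
--     if blocked:
--         return x
--     return [(el[0] + n, el[1]) for el in x]
-- ===== Notes on version B (the rewrite author's own statement) =====
-- stated objective: simpler
-- what changed: A interleaves boundary-check and list-building in one loop with early returns; B first decides feasibility with a single any() pass and then builds the shifted list with one comprehension.
import Mathlib
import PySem

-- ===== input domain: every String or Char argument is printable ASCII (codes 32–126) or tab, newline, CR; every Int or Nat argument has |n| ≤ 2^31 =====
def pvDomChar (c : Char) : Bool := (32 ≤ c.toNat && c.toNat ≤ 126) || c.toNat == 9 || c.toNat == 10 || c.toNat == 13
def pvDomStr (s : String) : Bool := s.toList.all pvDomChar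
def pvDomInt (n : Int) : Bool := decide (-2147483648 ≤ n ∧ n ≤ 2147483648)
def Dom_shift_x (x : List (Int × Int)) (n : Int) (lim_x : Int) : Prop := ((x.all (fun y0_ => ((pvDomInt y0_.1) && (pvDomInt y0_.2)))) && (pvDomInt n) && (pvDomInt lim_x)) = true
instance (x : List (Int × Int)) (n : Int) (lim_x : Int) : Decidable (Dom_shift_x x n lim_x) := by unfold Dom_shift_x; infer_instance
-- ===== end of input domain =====

-- B replaces A's interleaved check-and-build loop with a feasibility pass (any) followed by a map (objective: simpler).


-- ===== PORT A =====
-- loop over the remaining elements, carrying the accumulated coords; early return yields the original x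
def shift_x_go (orig : List (Int × Int)) (n lim_x : Int) :
    List (Int × Int) → List (Int × Int) → List (Int × Int)
  | [], coords => coords
  | el :: rest, coords =>
    if n > 0 ∧ el.1 + n ≥ lim_x then orig
    else if n < 0 ∧ el.1 + n ≤ lim_x then orig
    else shift_x_go orig n lim_x rest (coords ++ [(el.1 + n, el.2)])

def shift_x (x : List (Int × Int)) (n : Int) (lim_x : Int) : List (Int × Int) :=
  shift_x_go x n lim_x x []

-- ===== PORT B =====
def shift_x_alt (x : List (Int × Int)) (n : Int) (lim_x : Int) : List (Int × Int) :=
  let blocked : Bool :=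
    if n > 0 then x.any (fun el => decide (el.1 + n ≥ lim_x))
    else if n < 0 then x.any (fun el => decide (el.1 + n ≤ lim_x))
    else false
  if blocked then x else x.map (fun el => (el.1 + n, el.2))

-- ===== PRECONDITION & SPEC =====
def Spec_shift_x (x : List (Int × Int)) (n : Int) (lim_x : Int) (out : List (Int × Int)) : Prop := out = shift_x_alt x n lim_x
instance (x : List (Int × Int)) (n : Int) (lim_x : Int) (out : List (Int × Int)) : Decidable (Spec_shift_x x n lim_x out) := by unfold Spec_shift_x; infer_instance

-- ===== CLAIM (what is proved, stated in full; the proofs are below) =====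
def Claim_equal_shift_x : Prop := ∀ (x : List (Int × Int)) (n : Int) (lim_x : Int), Dom_shift_x x n lim_x → Spec_shift_x x n lim_x (shift_x x n lim_x)

-- ===== LEMMAS AND PROOFS =====

-- the loop either hits a blocking element (any) and returns orig, or appends all shifted elements
theorem shift_x_go_eq (orig : List (Int × Int)) (n lim_x : Int)
    (rest coords : List (Int × Int)) :
    shift_x_go orig n lim_x rest coords =
      (if rest.any (fun el =>
            (decide (n > 0) && decide (el.1 + n ≥ lim_x)) ||
            (decide (n < 0) && decide (el.1 + n ≤ lim_x)))
       then orig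
       else coords ++ rest.map (fun el => (el.1 + n, el.2))) := by
  induction rest generalizing coords with
  | nil => simp [shift_x_go]
  | cons el rest ih =>
    simp only [shift_x_go, List.any_cons, List.map_cons]
    by_cases h1 : n > 0 ∧ el.1 + n ≥ lim_x
    · simp [h1.1, h1.2]
    · by_cases h2 : n < 0 ∧ el.1 + n ≤ lim_x
      · simp [h2.1, h2.2, h1]
      · rw [if_neg h1, if_neg h2, ih]
        have hb : ((decide (n > 0) && decide (el.1 + n ≥ lim_x)) ||
            (decide (n < 0) && decide (el.1 + n ≤ lim_x))) = false := by
          simp only [Bool.or_eq_false_iff, Bool.and_eq_false_iff]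
          constructor
          · by_cases hn : n > 0
            · exact Or.inr (by simpa using fun h => h1 ⟨hn, h⟩)
            · exact Or.inl (by simpa using hn)
          · by_cases hn : n < 0
            · exact Or.inr (by simpa using fun h => h2 ⟨hn, h⟩)
            · exact Or.inl (by simpa using hn)
        rw [hb, Bool.false_or]
        split <;> simp

-- ===== VERDICT (by name: the statement is the Claim_ definition above) =====
theorem shift_x_spec : Claim_equal_shift_x := by
  intro x n lim_x _
  unfold Spec_shift_x shift_x shift_x_alt
  rw [shift_x_go_eq]
  rcases lt_trichotomy n 0 with hn | hn | hn
  · simp only [if_neg (not_lt.mpr hn.le), if_pos hn]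
    have : ∀ el : Int × Int,
        ((decide (n > 0) && decide (el.1 + n ≥ lim_x)) ||
         (decide (n < 0) && decide (el.1 + n ≤ lim_x))) =
        decide (el.1 + n ≤ lim_x) := by
      intro el; simp [not_lt.mpr hn.le, hn]
    simp only [this, List.nil_append]
  · subst hn; simp
  · simp only [if_pos hn]
    have : ∀ el : Int × Int,
        ((decide (n > 0) && decide (el.1 + n ≥ lim_x)) ||
         (decide (n < 0) && decide (el.1 + n ≤ lim_x))) =
        decide (el.1 + n ≥ lim_x) := by
      intro el; simp [hn, not_lt.mpr hn.le]
    simp only [this, List.nil_append]
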